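-- pv_equiv track=rewrite | github.com/larson-group/clubb_release | utilities/CLUBBStandardsCheck.py | strip_strings
-- ===== SOURCE A (Python) =====
-- def strip_strings(line: str) -> str:
--     """Remove Fortran string literals delimited by ' or "."""
--     out = []
--     in_single = in_double = False
--     for ch in line:
--         if in_single:
--             if ch == "'":
--                 in_single = False
--             continue
--         if in_double:
--             if ch == '"':
--                 in_double = False
--             continue
--         if ch == "'":
--             in_single = True
--             continue
--         if ch == '"':
--             in_double = True
--             continue
--         out.append(ch)
--     return "".join(out)
-- ===== SOURCE B (Python) =====
-- def strip_strings(line: str) -> str: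
--     """Remove Fortran string literals delimited by ' or "."""
--     out = []
--     i = 0
--     n = len(line)
--     while i < n:
--         ch = line[i]
--         if ch == "'" or ch == '"':
--             j = line.find(ch, i + 1)
--             i = n if j == -1 else j + 1
--         else:
--             out.append(ch)
--             i += 1
--     return "".join(out)
-- ===== Notes on version B (the rewrite author's own statement) =====
-- stated objective: simpler
-- what changed: Replaced the per-character two-flag state machine with a jump-based scan: on a quote, str.find locates the matching close and the index skips past the whole literal at once; no in_single/in_double state is carried.
import Mathlib
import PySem

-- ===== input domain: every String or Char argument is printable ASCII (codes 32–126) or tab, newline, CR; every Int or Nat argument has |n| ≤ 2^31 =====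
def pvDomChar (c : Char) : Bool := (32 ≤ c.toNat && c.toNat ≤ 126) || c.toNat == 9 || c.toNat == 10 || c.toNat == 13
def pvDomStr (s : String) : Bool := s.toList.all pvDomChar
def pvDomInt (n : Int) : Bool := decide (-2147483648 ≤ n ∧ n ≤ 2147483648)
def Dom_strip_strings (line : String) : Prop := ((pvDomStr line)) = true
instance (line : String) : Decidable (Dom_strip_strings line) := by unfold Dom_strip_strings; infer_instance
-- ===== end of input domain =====

-- B replaces A's per-character two-flag state machine by a jump-based scan (find the
-- closing quote and skip the whole literal at once); objective: simpler. Same return value.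

-- ===== PORT A =====
-- A's loop body, one step of the fold over the characters; state = (out, in_single, in_double)
def stripStep (st : List Char × Bool × Bool) (ch : Char) : List Char × Bool × Bool :=
  match st with
  | (out, in_single, in_double) =>
    if in_single then
      (out, (if ch = '\'' then false else in_single), in_double)
    else if in_double then
      (out, in_single, (if ch = '"' then false else in_double))
    else if ch = '\'' then (out, true, in_double)
    else if ch = '"' then (out, in_single, true)
    else (out ++ [ch], in_single, in_double)

def strip_strings (line : String) : String :=
  String.ofList (line.toList.foldl stripStep ([], false, false)).1

-- ===== PORT B =====
-- line.find(ch, i+1) + jump: drop everything up to and including the matching close quote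
def stripSkip (q : Char) : List Char → List Char
  | [] => []
  | c :: cs => if c = q then cs else stripSkip q cs

theorem stripSkip_length_le (q : Char) (cs : List Char) :
    (stripSkip q cs).length ≤ cs.length := by
  induction cs with
  | nil => simp [stripSkip]
  | cons c cs ih =>
    simp only [stripSkip]
    split
    · simp
    · exact Nat.le_succ_of_le ih

def stripGo : List Char → List Char
  | [] => []
  | c :: cs =>
    if c = '\'' ∨ c = '"' then stripGo (stripSkip c cs)
    else c :: stripGo cs
termination_by cs => cs.length
decreasing_by
  · exact Nat.lt_succ_of_le (stripSkip_length_le _ _)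
  · simp

def strip_strings_alt (line : String) : String :=
  String.ofList (stripGo line.toList)

-- ===== PRECONDITION & SPEC =====
def Spec_strip_strings (line : String) (out : String) : Prop := out = strip_strings_alt line
instance (line : String) (out : String) : Decidable (Spec_strip_strings line out) := by unfold Spec_strip_strings; infer_instance

-- ===== CLAIM (what is proved, stated in full; the proofs are below) =====
def Claim_equal_strip_strings : Prop := ∀ (line : String), Dom_strip_strings line → Spec_strip_strings line (strip_strings line)

-- ===== LEMMAS AND PROOFS =====

-- folding from the "inside a literal" state equals folding the suffix after the close quote
theorem foldl_inSingle (cs : List Char) (out : List Char) :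
    (cs.foldl stripStep (out, true, false)).1
      = ((stripSkip '\'' cs).foldl stripStep (out, false, false)).1 := by
  induction cs generalizing out with
  | nil => rfl
  | cons c cs ih =>
    by_cases h : c = '\''
    · simp [stripStep, stripSkip, h]
    · simpa [stripStep, stripSkip, h] using ih out

theorem foldl_inDouble (cs : List Char) (out : List Char) :
    (cs.foldl stripStep (out, false, true)).1
      = ((stripSkip '"' cs).foldl stripStep (out, false, false)).1 := by
  induction cs generalizing out with
  | nil => rfl
  | cons c cs ih =>
    by_cases h : c = '"'
    · simp [stripStep, stripSkip, h]
    · simpa [stripStep, stripSkip, h] using ih out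

theorem foldl_eq_go (cs : List Char) : ∀ (out : List Char),
    (cs.foldl stripStep (out, false, false)).1 = out ++ stripGo cs := by
  induction hn : cs.length using Nat.strong_induction_on generalizing cs with
  | _ n ih =>
    intro out
    match cs with
    | [] => simp [stripGo]
    | c :: cs' =>
      by_cases h1 : c = '\''
      · have hlt : (stripSkip '\'' cs').length < n := by
          subst hn; exact Nat.lt_succ_of_le (stripSkip_length_le _ _)
        rw [List.foldl_cons,
          show stripStep (out, false, false) c = (out, true, false) by simp [stripStep, h1]]
        rw [foldl_inSingle, ih _ hlt _ rfl out, stripGo]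
        simp [h1]
      · by_cases h2 : c = '"'
        · have hlt : (stripSkip '"' cs').length < n := by
            subst hn; exact Nat.lt_succ_of_le (stripSkip_length_le _ _)
          rw [List.foldl_cons,
            show stripStep (out, false, false) c = (out, false, true) by simp [stripStep, h2]]
          rw [foldl_inDouble, ih _ hlt _ rfl out, stripGo]
          simp [h2]
        · have hlt : cs'.length < n := by subst hn; exact Nat.lt_succ_self _
          rw [List.foldl_cons,
            show stripStep (out, false, false) c = (out ++ [c], false, false) by
              simp [stripStep, h1, h2]]
          rw [ih _ hlt _ rfl (out ++ [c]), stripGo]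
          simp [h1, h2]

-- ===== VERDICT (by name: the statement is the Claim_ definition above) =====
theorem strip_strings_spec : Claim_equal_strip_strings := by
  intro line _
  unfold Spec_strip_strings strip_strings strip_strings_alt
  rw [foldl_eq_go]
  simp
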